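-- pv_equiv track=rewrite | github.com/ryanwongyy/role-system-ORM-submission | 09_scripts/build_p1_db.py | aggregate_role_status
-- ===== SOURCE A (Python) =====
-- def aggregate_role_status(role_rows: list[dict[str, str]], target_labels: set[str]) -> str:
--     relevant = [row for row in role_rows if row["role_label"] in target_labels]
--     if not relevant:
--         return "unclear"
--     precedence = [
--         "robust",
--         "conditional",
--         "transformed",
--         "split_pressure",
--         "merge_pressure",
--         "shrinking",
--         "unclear",
--         "not_applicable",
--     ]
--     statuses = {row["status_in_case"] for row in relevant}
--     for status in precedence:
--         if status in statuses:
--             return status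
--     return "unclear"
-- ===== SOURCE B (Python) =====
-- def aggregate_role_status(role_rows: list[dict[str, str]], target_labels: set[str]) -> str:
--     precedence = [
--         "robust",
--         "conditional",
--         "transformed",
--         "split_pressure",
--         "merge_pressure",
--         "shrinking",
--         "unclear",
--         "not_applicable",
--     ]
--     rank = {status: i for i, status in enumerate(precedence)}
--     best = None
--     for row in role_rows:
--         if row["role_label"] in target_labels:
--             r = rank.get(row["status_in_case"])
--             if r is not None and (best is None or r < best):
--                 best = r
--     return precedence[best] if best is not None else "unclear"
-- ===== Notes on version B (the rewrite author's own statement) =====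
-- stated objective: alternative
-- what changed: Replaces A's relevant-list build, status-set construction and precedence-list scan by a precomputed status->rank dict and a single min-of-ranks reduction over the rows, indexing the precedence list once at the end.
import Mathlib
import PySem

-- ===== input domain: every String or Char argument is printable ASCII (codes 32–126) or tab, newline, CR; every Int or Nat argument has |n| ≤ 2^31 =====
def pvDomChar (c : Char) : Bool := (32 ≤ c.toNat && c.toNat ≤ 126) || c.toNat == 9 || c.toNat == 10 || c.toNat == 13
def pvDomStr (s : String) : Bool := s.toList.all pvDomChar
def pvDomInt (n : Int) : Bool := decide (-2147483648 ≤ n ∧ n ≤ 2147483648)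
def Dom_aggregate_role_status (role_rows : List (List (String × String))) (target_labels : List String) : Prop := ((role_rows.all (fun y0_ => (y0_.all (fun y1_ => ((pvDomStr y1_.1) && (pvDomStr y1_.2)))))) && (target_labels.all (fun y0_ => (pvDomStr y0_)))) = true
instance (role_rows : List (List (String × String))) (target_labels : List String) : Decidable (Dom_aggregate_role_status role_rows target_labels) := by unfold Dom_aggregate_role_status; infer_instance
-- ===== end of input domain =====

-- B replaces A's status-set build plus precedence scan by a single min-reduction of
-- precomputed status ranks over the rows (objective: alternative decomposition, same cost).

-- ===== PORT A =====
-- 'for status in precedence: if status in statuses: return status; return "unclear"'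
def aLoop (precedence : List String) (statuses : PySem.Set String) : String :=
  match precedence with
  | [] => "unclear"
  | status :: rest => if PySem.Set.contains statuses status then status else aLoop rest statuses

def aggregate_role_status (role_rows : List (List (String × String))) (target_labels : List String) : String :=
  let relevant := role_rows.filter
    (fun row => target_labels.contains (((PySem.Dict.mk row).get? "role_label").getD ""))
  if relevant = [] then "unclear"
  else
    let precedence := ["robust", "conditional", "transformed", "split_pressure",
                       "merge_pressure", "shrinking", "unclear", "not_applicable"]
    let statuses : PySem.Set String :=
      PySem.Set.ofList (relevant.map (fun row => ((PySem.Dict.mk row).get? "status_in_case").getD ""))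
    aLoop precedence statuses

-- ===== PORT B =====
def bPrecedence : List String :=
  ["robust", "conditional", "transformed", "split_pressure",
   "merge_pressure", "shrinking", "unclear", "not_applicable"]

-- rank = {status: i for i, status in enumerate(precedence)}
def bRank : PySem.Dict String Int :=
  (PySem.List.enumerate bPrecedence).foldl (fun d p => d.insert p.2 p.1) PySem.Dict.empty

def aggregate_role_status_alt (role_rows : List (List (String × String))) (target_labels : List String) : String :=
  let best : Option Int := role_rows.foldl
    (fun best row =>
      if target_labels.contains (((PySem.Dict.mk row).get? "role_label").getD "") then
        match bRank.get? (((PySem.Dict.mk row).get? "status_in_case").getD "") with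
        | none => best
        | some r =>
          match best with
          | none => some r
          | some b => if r < b then some r else best
      else best)
    none
  match best with
  | some b => (PySem.List.pyGet? bPrecedence b).getD ""
  | none => "unclear"

-- ===== PRECONDITION & SPEC =====
-- Pre_ excludes exactly the inputs where Python A raises KeyError: a row without a
-- "role_label" key, or a row matching the target labels without a "status_in_case" key.
def Pre_aggregate_role_status (role_rows : List (List (String × String))) (target_labels : List String) : Prop :=
  ∀ row ∈ role_rows,
    ((PySem.Dict.mk row).get? "role_label").isSome = true ∧
    (target_labels.contains (((PySem.Dict.mk row).get? "role_label").getD "") = true →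
      ((PySem.Dict.mk row).get? "status_in_case").isSome = true)
instance (role_rows : List (List (String × String))) (target_labels : List String) : Decidable (Pre_aggregate_role_status role_rows target_labels) := by unfold Pre_aggregate_role_status; infer_instance

def pvWitness_aggregate_role_status : (List (List (String × String))) × List String :=
  ([[("role_label", "a"), ("status_in_case", "shrinking")],
    [("role_label", "b"), ("status_in_case", "robust")]], ["a", "b"])

def Spec_aggregate_role_status (role_rows : List (List (String × String))) (target_labels : List String) (out : String) : Prop := out = aggregate_role_status_alt role_rows target_labels
instance (role_rows : List (List (String × String))) (target_labels : List String) (out : String) : Decidable (Spec_aggregate_role_status role_rows target_labels out) := by unfold Spec_aggregate_role_status; infer_instance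

-- ===== CLAIM (what is proved, stated in full; the proofs are below) =====
def Claim_equal_aggregate_role_status : Prop := ∀ (role_rows : List (List (String × String))) (target_labels : List String), Dom_aggregate_role_status role_rows target_labels → Pre_aggregate_role_status role_rows target_labels → Spec_aggregate_role_status role_rows target_labels (aggregate_role_status role_rows target_labels)

-- ===== LEMMAS AND PROOFS =====

-- option-min, the value B's fold accumulates
def omin (a b : Option Int) : Option Int :=
  match a, b with
  | none, b => b
  | a, none => a
  | some x, some y => some (min x y)

theorem omin_none_left (b : Option Int) : omin none b = b := rfl

theorem omin_none_right (a : Option Int) : omin a none = a := by cases a <;> rfl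

theorem omin_assoc (a b c : Option Int) : omin (omin a b) c = omin a (omin b c) := by
  cases a <;> cases b <;> cases c <;> simp [omin, min_assoc]

-- B's step is omin with the rank of the row's status
theorem step_eq_omin (best r : Option Int) :
    (match r with
     | none => best
     | some r =>
       match best with
       | none => some r
       | some b => if r < b then some r else best) = omin best r := by
  cases r <;> cases best <;> simp [omin, min_def] <;> split <;> simp <;> omega

-- foldr-style min of the ranks of a status list
def minR (S : List String) : Option Int :=
  match S with
  | [] => none
  | s :: rest => omin (bRank.get? s) (minR rest)

theorem foldl_omin (S : List String) (b : Option Int) :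
    S.foldl (fun a s => omin a (bRank.get? s)) b = omin b (minR S) := by
  induction S generalizing b with
  | nil => simp [minR, omin_none_right]
  | cons s rest ih => simp [minR, ih, ← omin_assoc]

theorem bRank_eq : bRank = PySem.Dict.mk
    [("robust", 0), ("conditional", 1), ("transformed", 2), ("split_pressure", 3),
     ("merge_pressure", 4), ("shrinking", 5), ("unclear", 6), ("not_applicable", 7)] := by rfl

-- closed form of minR over the eight precedence statuses
def idxFirst (S : List String) : Option Int :=
  if S.contains "robust" then some 0
  else if S.contains "conditional" then some 1
  else if S.contains "transformed" then some 2
  else if S.contains "split_pressure" then some 3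
  else if S.contains "merge_pressure" then some 4
  else if S.contains "shrinking" then some 5
  else if S.contains "unclear" then some 6
  else if S.contains "not_applicable" then some 7
  else none

set_option maxHeartbeats 1600000 in
theorem minR_eq_idxFirst (S : List String) : minR S = idxFirst S := by
  induction S with
  | nil => rfl
  | cons s rest ih =>
    rw [minR, ih]
    by_cases h0 : s = "robust"
    · subst h0; unfold idxFirst; simp [bRank_eq, PySem.Dict.get?_mk_cons]
      split_ifs <;> decide
    · by_cases h1 : s = "conditional"
      · subst h1; unfold idxFirst; simp [bRank_eq, PySem.Dict.get?_mk_cons]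
        split_ifs <;> decide
      · by_cases h2 : s = "transformed"
        · subst h2; unfold idxFirst; simp [bRank_eq, PySem.Dict.get?_mk_cons]
          split_ifs <;> decide
        · by_cases h3 : s = "split_pressure"
          · subst h3; unfold idxFirst; simp [bRank_eq, PySem.Dict.get?_mk_cons]
            split_ifs <;> decide
          · by_cases h4 : s = "merge_pressure"
            · subst h4; unfold idxFirst; simp [bRank_eq, PySem.Dict.get?_mk_cons]
              split_ifs <;> decide
            · by_cases h5 : s = "shrinking"
              · subst h5; unfold idxFirst; simp [bRank_eq, PySem.Dict.get?_mk_cons]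
                split_ifs <;> decide
              · by_cases h6 : s = "unclear"
                · subst h6; unfold idxFirst; simp [bRank_eq, PySem.Dict.get?_mk_cons]
                  split_ifs <;> decide
                · by_cases h7 : s = "not_applicable"
                  · subst h7; unfold idxFirst; simp [bRank_eq, PySem.Dict.get?_mk_cons]
                    split_ifs <;> decide
                  · have hr : bRank.get? s = none := by
                      simp [bRank_eq, PySem.Dict.get?_mk_cons,
                        Ne.symm h0, Ne.symm h1, Ne.symm h2, Ne.symm h3,
                        Ne.symm h4, Ne.symm h5, Ne.symm h6, Ne.symm h7]
                      rfl
                    rw [hr]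
                    simp [omin, idxFirst, Ne.symm h0, Ne.symm h1, Ne.symm h2, Ne.symm h3, Ne.symm h4, Ne.symm h5, Ne.symm h6, Ne.symm h7]

-- A's precedence scan over the status SET equals B's rank-min closed form
theorem aLoop_eq_idxFirst (S : List String) :
    aLoop ["robust", "conditional", "transformed", "split_pressure",
           "merge_pressure", "shrinking", "unclear", "not_applicable"]
      (PySem.Set.ofList S)
    = (match idxFirst S with
       | some b => (PySem.List.pyGet? bPrecedence b).getD ""
       | none => "unclear") := by
  have hc : ∀ x : String, (PySem.Set.ofList S).contains x = S.contains x := by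
    intro x
    simp [PySem.Set.mem_ofList]
  simp only [aLoop, idxFirst, hc]
  split_ifs <;> rfl

-- ===== VERDICT (by name: the statement is the Claim_ definition above) =====
theorem aggregate_role_status_spec : Claim_equal_aggregate_role_status := by
  intro role_rows target_labels _ _
  simp only [Spec_aggregate_role_status, aggregate_role_status, aggregate_role_status_alt]
  rw [show (fun (best : Option Int) (row : List (String × String)) =>
      if target_labels.contains (((PySem.Dict.mk row).get? "role_label").getD "") then
        match bRank.get? (((PySem.Dict.mk row).get? "status_in_case").getD "") with
        | none => best
        | some r =>
          match best with
          | none => some r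
          | some b => if r < b then some r else best
      else best)
    = (fun best row =>
      if target_labels.contains (((PySem.Dict.mk row).get? "role_label").getD "") then
        (fun a s => omin a (bRank.get? s)) best
          ((fun row => ((PySem.Dict.mk row).get? "status_in_case").getD "") row)
      else best) from by funext best row; rw [step_eq_omin]]
  rw [← List.foldl_filter,
    ← List.foldl_map (f := fun row => ((PySem.Dict.mk row).get? "status_in_case").getD "")
      (g := fun a s => omin a (bRank.get? s)), foldl_omin, omin_none_left, minR_eq_idxFirst]
  set relevant := role_rows.filter
    (fun row => target_labels.contains (((PySem.Dict.mk row).get? "role_label").getD "")) with hrel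
  by_cases hempty : relevant = []
  · simp [hempty, idxFirst]
  · rw [if_neg hempty, aLoop_eq_idxFirst]
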